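-- pv_equiv track=rewrite | github.com/JenZhen/SysDesign | chpt_2/consistentHashing.py | consistentHashing
-- ===== SOURCE A (Python) =====
-- def consistentHashing(n):
--     # write your code here
--     if n == 0:
--         return [[]]
--     ret = [[0, 359, 1]]
--     # i loop iterates i times to
--     # caculate i intervals
--     for i in range(1, n):
--         # splitAt indicates which interval to split
--         splitAt = 0
--         # iterate thru i (current intervals)
--         # to find the biggest to split
--         for j in range(i):
--             if ret[j][1] - ret[j][0] > ret[splitAt][1] - ret[splitAt][0]:
--                 splitAt = j
--         start = ret[splitAt][0]
--         end = ret[splitAt][1]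
--
--         ret[splitAt][1] = int((start + end) / 2)
--         newInterval = [int((start + end) / 2 + 1), end, i + 1]
--         ret.append(newInterval)
--     return ret
-- ===== SOURCE B (Python) =====
-- def _merge(a, b):
--     # skew-heap merge; a node is (key, left, right), key = (negLen, position)
--     if a is None:
--         return b
--     if b is None:
--         return a
--     if a[0] <= b[0]:
--         return (a[0], _merge(a[2], b), a[1])
--     return (b[0], _merge(b[2], a), b[1])
--
--
-- def consistentHashing(n):
--     if n == 0:
--         return [[]]
--     arr = [(0, 359)]
--     heap = ((-359, 0), None, None)
--     for i in range(1, n):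
--         (negLen, p), l, r = heap
--         heap = _merge(l, r)
--         s, e = arr[p]
--         m = (s + e) // 2
--         arr[p] = (s, m)
--         arr.append((m + 1, e))
--         heap = _merge(_merge(heap, ((-(m - s), p), None, None)),
--                       ((-(e - m - 1), i), None, None))
--     return [[s, e, p + 1] for p, (s, e) in enumerate(arr)]
-- ===== Notes on version B (the rewrite author's own statement) =====
-- stated objective: faster
-- what changed: Replaced A's O(n) linear rescan of all intervals for the largest one in every iteration by a skew-heap priority queue keyed by (-length, position), so each split selects and reinserts in O(log n).
import Mathlib
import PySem

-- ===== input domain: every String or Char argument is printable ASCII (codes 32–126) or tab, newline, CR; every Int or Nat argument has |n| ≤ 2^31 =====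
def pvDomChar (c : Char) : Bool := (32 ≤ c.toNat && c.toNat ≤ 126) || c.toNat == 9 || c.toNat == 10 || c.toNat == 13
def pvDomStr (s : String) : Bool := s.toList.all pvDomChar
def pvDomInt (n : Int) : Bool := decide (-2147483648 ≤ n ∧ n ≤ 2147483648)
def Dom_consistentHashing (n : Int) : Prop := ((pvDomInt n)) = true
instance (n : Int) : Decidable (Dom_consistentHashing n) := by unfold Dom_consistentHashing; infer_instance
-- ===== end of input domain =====

-- B replaces A's quadratic scan-for-largest-interval with a skew-heap priority queue keyed by
-- (-length, position); same output (measured faster at large n).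

-- ===== PORT A =====
-- ret[j][k]: every access A makes is in range, so the getD defaults are never used (exact)
def aGet (ret : List (List Int)) (j k : Int) : Int :=
  ((PySem.List.pyGet? ((PySem.List.pyGet? ret j).getD []) k)).getD 0

-- the inner 'for j in range(i)' scan selecting the first largest interval
def aScan (ret : List (List Int)) (i : Int) : Int :=
  (PySem.List.pyRange 0 i 1).foldl
    (fun sa j => if aGet ret j 1 - aGet ret j 0 > aGet ret sa 1 - aGet ret sa 0 then j else sa) 0

-- one iteration of A's outer loop; int((start+end)/2) is ported as floor division, exact here
-- because every endpoint A ever stores is nonnegative (truncation = floor on nonnegatives)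
def aStep (ret : List (List Int)) (i : Int) : List (List Int) :=
  let splitAt := aScan ret i
  let s := aGet ret splitAt 0
  let e := aGet ret splitAt 1
  let m := PySem.Int.floordiv (s + e) 2
  -- ret[splitAt][1] = m : in-place update at an index that is always in range (exact)
  (ret.modify splitAt.toNat (fun l => l.set 1 m)) ++ [[m + 1, e, i + 1]]

def consistentHashing (n : Int) : List (List Int) :=
  if n = 0 then [[]]
  else (PySem.List.pyRange 1 n 1).foldl aStep [[0, 359, 1]]

-- ===== PORT B =====
-- Python tuple comparison a <= b on pairs of ints
def lexLe (a b : Int × Int) : Bool := decide (a.1 < b.1 ∨ (a.1 = b.1 ∧ a.2 ≤ b.2))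

-- skew heap: a Python node is (key, left, right) with key = (negLen, position)
inductive SHeap where
  | nil : SHeap
  | node : Int → Int → SHeap → SHeap → SHeap
deriving DecidableEq, Repr

def SHeap.size : SHeap → Nat
  | .nil => 0
  | .node _ _ l r => l.size + r.size + 1

-- Source B's _merge, step for step; the fuel argument (enough for all the recursion that can
-- happen: each call drops one node) is only a structural-termination guard
def SHeap.mergeF : Nat → SHeap → SHeap → SHeap
  | _, .nil, b => b
  | _, .node a1 a2 al ar, .nil => .node a1 a2 al ar
  | 0, .node a1 a2 al ar, .node _ _ _ _ => .node a1 a2 al ar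
  | fuel + 1, .node a1 a2 al ar, .node b1 b2 bl br =>
    if lexLe (a1, a2) (b1, b2) then .node a1 a2 (SHeap.mergeF fuel ar (.node b1 b2 bl br)) al
    else .node b1 b2 (SHeap.mergeF fuel br (.node a1 a2 al ar)) bl

def SHeap.merge (a b : SHeap) : SHeap := SHeap.mergeF (a.size + b.size) a b

-- one iteration of Source B's loop; the .nil case is unreachable (the heap holds one entry per
-- interval, hence is nonempty whenever the loop body runs) and is only a totality guard
def bStep : (List (Int × Int) × SHeap) → Int → (List (Int × Int) × SHeap)
  | (arr, .nil), _ => (arr, .nil)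
  | (arr, .node _ p l r), i =>
    let rest := SHeap.merge l r
    -- s, e = arr[p]: p is always in range (exact)
    let se := (PySem.List.pyGet? arr p).getD (0, 0)
    let s := se.1
    let e := se.2
    let m := PySem.Int.floordiv (s + e) 2
    -- arr[p] = (s, m); arr.append((m + 1, e))
    let arr' := arr.set p.toNat (s, m) ++ [(m + 1, e)]
    let h' := SHeap.merge (SHeap.merge rest (.node (-(m - s)) p .nil .nil))
                          (.node (-(e - m - 1)) i .nil .nil)
    (arr', h')

def consistentHashing_alt (n : Int) : List (List Int) :=
  if n = 0 then [[]]
  else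
    let st := (PySem.List.pyRange 1 n 1).foldl bStep ([(0, 359)], SHeap.node (-359) 0 .nil .nil)
    (PySem.List.enumerate st.1).map (fun pe => [pe.2.1, pe.2.2, pe.1 + 1])

-- ===== PRECONDITION & SPEC =====
def Spec_consistentHashing (n : Int) (out : List (List Int)) : Prop := out = consistentHashing_alt n
instance (n : Int) (out : List (List Int)) : Decidable (Spec_consistentHashing n out) := by unfold Spec_consistentHashing; infer_instance

-- ===== CLAIM (what is proved, stated in full; the proofs are below) =====
def Claim_equal_consistentHashing : Prop := ∀ (n : Int), Dom_consistentHashing n → Spec_consistentHashing n (consistentHashing n)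

-- ===== LEMMAS AND PROOFS =====

-- A's interval list, reconstructed from B's position-indexed array (id at position p is p+1)
def toRet (arr : List (Int × Int)) : List (List Int) :=
  (List.range arr.length).map (fun p => [(arr.getD p (0,0)).1, (arr.getD p (0,0)).2, (p : Int) + 1])

-- the heap key of position p of arr
def keyAt (arr : List (Int × Int)) (p : Nat) : Int × Int :=
  (-((arr.getD p (0,0)).2 - (arr.getD p (0,0)).1), (p : Int))

def keys (arr : List (Int × Int)) : List (Int × Int) :=
  (List.range arr.length).map (keyAt arr)

def SHeap.toList : SHeap → List (Int × Int)
  | .nil => []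
  | .node a b l r => (a, b) :: (l.toList ++ r.toList)

def HOrd : SHeap → Prop
  | .nil => True
  | .node a b l r => (∀ x ∈ l.toList ++ r.toList, lexLe (a, b) x = true) ∧ HOrd l ∧ HOrd r

theorem lexLe_refl (a : Int × Int) : lexLe a a = true := by
  simp [lexLe]

theorem lexLe_trans {a b c : Int × Int} (h1 : lexLe a b = true) (h2 : lexLe b c = true) :
    lexLe a c = true := by
  simp [lexLe] at *; omega

theorem lexLe_antisymm {a b : Int × Int} (h1 : lexLe a b = true) (h2 : lexLe b a = true) :
    a = b := by
  simp [lexLe] at h1 h2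
  have : a.1 = b.1 ∧ a.2 = b.2 := by omega
  exact Prod.ext this.1 this.2

theorem lexLe_total (a b : Int × Int) : lexLe a b = true ∨ lexLe b a = true := by
  simp [lexLe]; omega

theorem count_perm {α : Type} [DecidableEq α] {l1 l2 : List α}
    (h : ∀ x, l1.count x = l2.count x) : l1.Perm l2 :=
  List.perm_iff_count.mpr h

theorem mergeF_toList (fuel : Nat) : ∀ (x y : SHeap), x.size + y.size ≤ fuel →
    (SHeap.mergeF fuel x y).toList.Perm (x.toList ++ y.toList) := by
  induction fuel with
  | zero =>
    intro x y h
    cases x with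
    | nil => simp [SHeap.mergeF, SHeap.toList]
    | node a1 a2 al ar =>
      cases y with
      | nil => simp [SHeap.mergeF, SHeap.toList]
      | node b1 b2 bl br => exfalso; simp [SHeap.size] at h
  | succ fuel ih =>
    intro x y h
    cases x with
    | nil => simp [SHeap.mergeF, SHeap.toList]
    | node a1 a2 al ar =>
      cases y with
      | nil => simp [SHeap.mergeF, SHeap.toList]
      | node b1 b2 bl br =>
        simp only [SHeap.mergeF]
        have hsz : ar.size + (SHeap.node b1 b2 bl br).size ≤ fuel ∧
            br.size + (SHeap.node a1 a2 al ar).size ≤ fuel := by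
          simp only [SHeap.size] at h ⊢; omega
        by_cases hle : lexLe (a1, a2) (b1, b2) = true
        · rw [if_pos hle]
          simp only [SHeap.toList]
          refine List.Perm.cons _ (((ih ar _ hsz.1).append_right _).trans ?_)
          apply count_perm; intro x
          simp [SHeap.toList, List.count_append, List.count_cons]
          ring
        · rw [if_neg hle]
          simp only [SHeap.toList]
          refine (((ih br _ hsz.2).append_right _).cons _).trans ?_
          apply count_perm; intro x
          simp [SHeap.toList, List.count_append, List.count_cons]
          ring

theorem merge_toList (x y : SHeap) :
    (SHeap.merge x y).toList.Perm (x.toList ++ y.toList) :=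
  mergeF_toList _ x y le_rfl

theorem mergeF_hord (fuel : Nat) : ∀ (x y : SHeap), x.size + y.size ≤ fuel →
    HOrd x → HOrd y → HOrd (SHeap.mergeF fuel x y) := by
  induction fuel with
  | zero =>
    intro x y h hx hy
    cases x with
    | nil => simpa [SHeap.mergeF] using hy
    | node a1 a2 al ar =>
      cases y with
      | nil => simpa [SHeap.mergeF] using hx
      | node b1 b2 bl br => exfalso; simp [SHeap.size] at h
  | succ fuel ih =>
    intro x y h hx hy
    cases x with
    | nil => simpa [SHeap.mergeF] using hy
    | node a1 a2 al ar =>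
      cases y with
      | nil => simpa [SHeap.mergeF] using hx
      | node b1 b2 bl br =>
        obtain ⟨hxall, hxl, hxr⟩ := hx
        obtain ⟨hyall, hyl, hyr⟩ := hy
        have hsz : ar.size + (SHeap.node b1 b2 bl br).size ≤ fuel ∧
            br.size + (SHeap.node a1 a2 al ar).size ≤ fuel := by
          simp only [SHeap.size] at h ⊢; omega
        simp only [SHeap.mergeF]
        by_cases hle : lexLe (a1, a2) (b1, b2) = true
        · rw [if_pos hle]
          refine ⟨?_, ih ar _ hsz.1 hxr ⟨hyall, hyl, hyr⟩, hxl⟩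
          intro z hz
          rcases List.mem_append.mp hz with hz | hz
          · rcases List.mem_append.mp ((mergeF_toList fuel ar _ hsz.1).mem_iff.mp hz) with hm | hm
            · exact hxall z (List.mem_append.mpr (Or.inr hm))
            · simp only [SHeap.toList, List.mem_cons] at hm
              rcases hm with rfl | hm
              · exact hle
              · exact lexLe_trans hle (hyall z hm)
          · exact hxall z (List.mem_append.mpr (Or.inl hz))
        · rw [if_neg hle]
          have hba : lexLe (b1, b2) (a1, a2) = true := by
            rcases lexLe_total (a1, a2) (b1, b2) with hm | hm
            · exact absurd hm hle
            · exact hm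
          refine ⟨?_, ih br _ hsz.2 hyr ⟨hxall, hxl, hxr⟩, hyl⟩
          intro z hz
          rcases List.mem_append.mp hz with hz | hz
          · rcases List.mem_append.mp ((mergeF_toList fuel br _ hsz.2).mem_iff.mp hz) with hm | hm
            · exact hyall z (List.mem_append.mpr (Or.inr hm))
            · simp only [SHeap.toList, List.mem_cons] at hm
              rcases hm with rfl | hm
              · exact hba
              · exact lexLe_trans hba (hxall z hm)
          · exact hyall z (List.mem_append.mpr (Or.inl hz))

theorem merge_hord (x y : SHeap) (hx : HOrd x) (hy : HOrd y) : HOrd (SHeap.merge x y) :=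
  mergeF_hord _ x y le_rfl hx hy

theorem root_le {a b : Int} {l r : SHeap} (h : HOrd (SHeap.node a b l r)) :
    ∀ x ∈ (SHeap.node a b l r).toList, lexLe (a, b) x = true := by
  intro x hx
  simp only [SHeap.toList, List.mem_cons] at hx
  rcases hx with rfl | hx
  · exact lexLe_refl _
  · exact h.1 x hx

theorem set_perm {α : Type} (l : List α) (q : Nat) (v : α) (h : q < l.length) :
    (l.set q v).Perm (v :: l.eraseIdx q) := by
  induction l generalizing q with
  | nil => simp at h
  | cons a t ih =>
    cases q with
    | zero => simp
    | succ q =>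
      simp only [List.set_cons_succ, List.eraseIdx_cons_succ]
      exact ((ih q (by simpa using h)).cons a).trans (List.Perm.swap v a _)

theorem self_perm_eraseIdx {α : Type} (l : List α) (q : Nat) (h : q < l.length) :
    l.Perm (l[q] :: l.eraseIdx q) := by
  have := set_perm l q l[q] h
  simpa using this

theorem length_toRet (arr : List (Int × Int)) : (toRet arr).length = arr.length := by
  simp [toRet]

theorem length_keys (arr : List (Int × Int)) : (keys arr).length = arr.length := by
  simp [keys]

theorem keys_getElem (arr : List (Int × Int)) (q : Nat) (h : q < (keys arr).length) :
    (keys arr)[q] = keyAt arr q := by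
  simp [keys]

-- reading A's list: aGet (toRet arr) j c for j < length
theorem aGet_toRet0 (arr : List (Int × Int)) (j : Nat) (hj : j < arr.length) :
    aGet (toRet arr) (j : Int) 0 = (arr.getD j (0,0)).1 := by
  have hj' : j < (toRet arr).length := by simpa [length_toRet] using hj
  have hpg : PySem.List.pyGet? (toRet arr) (j : Int) = some (toRet arr)[j] :=
    PySem.List.pyGet?_ofNat (toRet arr) j hj'
  rw [aGet, hpg]
  have hel : (toRet arr)[j] = [(arr.getD j (0,0)).1, (arr.getD j (0,0)).2, (j : Int) + 1] := by
    simp [toRet]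
  rw [Option.getD_some, hel]
  simp [PySem.List.pyGet?, PySem.List.pyIdx?]

theorem aGet_toRet1 (arr : List (Int × Int)) (j : Nat) (hj : j < arr.length) :
    aGet (toRet arr) (j : Int) 1 = (arr.getD j (0,0)).2 := by
  have hj' : j < (toRet arr).length := by simpa [length_toRet] using hj
  have hpg : PySem.List.pyGet? (toRet arr) (j : Int) = some (toRet arr)[j] :=
    PySem.List.pyGet?_ofNat (toRet arr) j hj'
  rw [aGet, hpg]
  have hel : (toRet arr)[j] = [(arr.getD j (0,0)).1, (arr.getD j (0,0)).2, (j : Int) + 1] := by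
    simp [toRet]
  rw [Option.getD_some, hel]
  simp [PySem.List.pyGet?, PySem.List.pyIdx?]

-- the scan fold over range k, characterized: it returns the first position of maximal
-- length, i.e. the unique lexLe-minimum of the keys among positions < k
theorem scan_aux (arr : List (Int × Int)) (hL : 0 < arr.length) (k : Nat) (hk : k ≤ arr.length) :
    ∃ q : Nat, q < arr.length ∧ q ≤ k ∧
      (List.range k).foldl
        (fun sa (j : Nat) => if aGet (toRet arr) (0 + (j : Int)) 1 - aGet (toRet arr) (0 + (j : Int)) 0 >
                        aGet (toRet arr) sa 1 - aGet (toRet arr) sa 0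
                     then (0 + (j : Int)) else sa) 0 = (q : Int) ∧
      ∀ j : Nat, j < k → lexLe (keyAt arr q) (keyAt arr j) = true := by
  induction k with
  | zero =>
    exact ⟨0, hL, le_rfl, by simp, fun j hj => absurd hj (Nat.not_lt_zero j)⟩
  | succ k ih =>
    obtain ⟨q, hq, hqk, hfold, hmin⟩ := ih (Nat.le_of_succ_le hk)
    have hkl : k < arr.length := Nat.lt_of_lt_of_le (Nat.lt_succ_self k) hk
    rw [List.range_succ, List.foldl_append, hfold]
    simp only [List.foldl_cons, List.foldl_nil, zero_add]
    rw [aGet_toRet1 arr k hkl, aGet_toRet0 arr k hkl, aGet_toRet1 arr q hq, aGet_toRet0 arr q hq]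
    by_cases hc : (arr.getD k (0,0)).2 - (arr.getD k (0,0)).1 >
        (arr.getD q (0,0)).2 - (arr.getD q (0,0)).1
    · refine ⟨k, hkl, Nat.le_succ k, by rw [if_pos hc], ?_⟩
      intro j hj
      rcases Nat.lt_succ_iff_lt_or_eq.mp hj with hj | rfl
      · refine lexLe_trans ?_ (hmin j hj)
        simp only [lexLe, keyAt, decide_eq_true_eq]
        omega
      · exact lexLe_refl _
    · refine ⟨q, hq, Nat.le_succ_of_le hqk, by rw [if_neg hc], ?_⟩
      intro j hj
      rcases Nat.lt_succ_iff_lt_or_eq.mp hj with hj | rfl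
      · exact hmin j hj
      · simp only [lexLe, keyAt, decide_eq_true_eq]
        omega

theorem aScan_spec (arr : List (Int × Int)) (hL : 0 < arr.length) :
    ∃ q : Nat, q < arr.length ∧ aScan (toRet arr) (arr.length : Int) = (q : Int) ∧
      ∀ j : Nat, j < arr.length → lexLe (keyAt arr q) (keyAt arr j) = true := by
  obtain ⟨q, hq, _, hfold, hmin⟩ := scan_aux arr hL arr.length le_rfl
  refine ⟨q, hq, ?_, hmin⟩
  rw [aScan, PySem.List.pyRange_one, List.foldl_map]
  exact hfold

-- updating the interval table: A's in-place split = B's array update, element by element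
theorem toRet_update (arr : List (Int × Int)) (q : Nat) (hq : q < arr.length) (m e : Int)
    (he : (arr.getD q (0,0)).2 = e) :
    (toRet arr).modify q (fun l => l.set 1 m) ++ [[m + 1, e, (arr.length : Int) + 1]] =
      toRet (arr.set q ((arr.getD q (0,0)).1, m) ++ [(m + 1, e)]) := by
  apply List.ext_getElem
  · simp [toRet]
  · intro t h1 h2
    have hlen : t < arr.length + 1 := by
      simpa [toRet, List.length_modify] using h1
    by_cases ht : t < arr.length
    · rw [List.getElem_append_left (by simp [toRet, List.length_modify]; omega)]
      rw [List.getElem_modify]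
      have h2' : t < (List.range (arr.set q ((arr.getD q (0,0)).1, m) ++ [(m+1,e)]).length).length := by
        simp; omega
      simp only [toRet, List.getElem_map, List.getElem_range, List.length_map]
      by_cases hqt : q = t
      · subst hqt
        simp [List.getD, List.getElem?_append, hq, List.getElem?_set, List.getElem?_eq_getElem, ht]
      · simp [List.getD, List.getElem?_append, ht, List.getElem?_set, hqt,
              List.getElem?_eq_getElem, hqt]
    · have ht' : t = arr.length := by omega
      subst ht'
      rw [List.getElem_append_right (by simp [toRet, List.length_modify])]
      simp [toRet, List.length_modify, List.getD, List.getElem?_append, ← he,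
            List.getElem?_eq_getElem, hq]

-- updating the key multiset accordingly
theorem keys_update (arr : List (Int × Int)) (q : Nat) (hq : q < arr.length) (m e : Int)
    (he : (arr.getD q (0,0)).2 = e) :
    keys (arr.set q ((arr.getD q (0,0)).1, m) ++ [(m + 1, e)]) =
      (keys arr).set q (-(m - (arr.getD q (0,0)).1), (q : Int)) ++
        [(-(e - m - 1), (arr.length : Int))] := by
  apply List.ext_getElem
  · simp [keys]
  · intro t h1 h2
    have hlen : t < arr.length + 1 := by simpa [keys] using h1
    by_cases ht : t < arr.length
    · rw [List.getElem_append_left (by simp [keys]; omega)]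
      rw [List.getElem_set]
      simp only [keys, List.getElem_map, List.getElem_range, keyAt]
      by_cases hqt : q = t
      · subst hqt
        simp [List.getD, List.getElem?_append, hq, List.getElem?_set, List.getElem?_eq_getElem, ht]
      · simp [List.getD, List.getElem?_append, ht, List.getElem?_set, hqt,
              List.getElem?_eq_getElem]
    · have ht' : t = arr.length := by omega
      subst ht'
      rw [List.getElem_append_right (by simp [keys])]
      simp [keys, keyAt, List.getD, List.getElem?_append, ← he, List.getElem?_eq_getElem, hq]
      omega

-- one synchronized step
theorem step_eq (arr : List (Int × Int)) (hp : SHeap) (i : Int)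
    (hL : 0 < arr.length) (hi : i = (arr.length : Int))
    (hord : HOrd hp) (hperm : hp.toList.Perm (keys arr)) :
    aStep (toRet arr) i = toRet (bStep (arr, hp) i).1
    ∧ (bStep (arr, hp) i).1.length = arr.length + 1
    ∧ HOrd (bStep (arr, hp) i).2
    ∧ (bStep (arr, hp) i).2.toList.Perm (keys (bStep (arr, hp) i).1) := by
  cases hp with
  | nil =>
    exfalso
    have := hperm.length_eq
    simp [SHeap.toList, length_keys] at this
    omega
  | node k1 k2 l r =>
    obtain ⟨q, hq, hscan, hmin⟩ := aScan_spec arr hL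
    -- the heap root is the key that A's scan selects
    have hmem : (k1, k2) ∈ keys arr :=
      hperm.mem_iff.mp (by simp [SHeap.toList])
    obtain ⟨p, hpmem, hpk⟩ := List.mem_map.mp hmem
    have h1 : lexLe (k1, k2) (keyAt arr q) = true := by
      refine root_le hord _ (hperm.symm.mem_iff.mp ?_)
      exact List.mem_map.mpr ⟨q, List.mem_range.mpr hq, rfl⟩
    have h2 : lexLe (keyAt arr q) (k1, k2) = true := by
      rw [← hpk]; exact hmin p (List.mem_range.mp hpmem)
    have hroot : keyAt arr q = (k1, k2) := lexLe_antisymm h2 h1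
    have hk2 : k2 = (q : Int) := by
      have := congrArg Prod.snd hroot
      simpa [keyAt] using this.symm
    have hk1 : k1 = -((arr.getD q (0,0)).2 - (arr.getD q (0,0)).1) := by
      have := congrArg Prod.fst hroot
      simpa [keyAt] using this.symm
    subst hk2 hk1 hi
    -- evaluate both step functions
    have hse : PySem.List.pyGet? arr ((q : Nat) : Int) = some arr[q] :=
      PySem.List.pyGet?_ofNat arr q hq
    have hgd : arr.getD q (0,0) = arr[q] := List.getD_eq_getElem arr (0,0) hq
    simp only [bStep, hse, Option.getD_some, Int.toNat_natCast]
    simp only [aStep, hscan, aGet_toRet0 arr q hq, aGet_toRet1 arr q hq, Int.toNat_natCast]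
    set s := (arr.getD q (0,0)).1 with hs
    set e := (arr.getD q (0,0)).2 with he
    set m := PySem.Int.floordiv (s + e) 2 with hm
    have hs' : arr[q].1 = s := by rw [hs, hgd]
    have he' : arr[q].2 = e := by rw [he, hgd]
    rw [hs', he']
    have harr' : (arr.set q (s, m) ++ [(m + 1, e)]).length = arr.length + 1 := by simp
    refine ⟨?_, harr', ?_, ?_⟩
    · exact toRet_update arr q hq m e rfl
    · -- heap order is preserved
      apply merge_hord
      apply merge_hord
      · exact merge_hord l r hord.2.1 hord.2.2
      · simp [HOrd, SHeap.toList]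
      · simp [HOrd, SHeap.toList]
    · -- the multiset of keys is preserved
      have hklen : q < (keys arr).length := by simpa [length_keys] using hq
      have hkq : (keys arr)[q] = (-(e - s), (q : Int)) := by
        rw [keys_getElem arr q hklen, hroot]
      have hperm0 : ((-(e - s), (q : Int)) :: (l.toList ++ r.toList)).Perm (keys arr) := hperm
      have hlr : (l.toList ++ r.toList).Perm ((keys arr).eraseIdx q) := by
        have hsplit : (keys arr).Perm ((-(e - s), (q : Int)) :: (keys arr).eraseIdx q) := by
          have hh := self_perm_eraseIdx (keys arr) q hklen
          rwa [hkq] at hh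
        exact (hperm0.trans hsplit).cons_inv
      have hkeq : keys (arr.set q (s, m) ++ [(m + 1, e)]) =
          (keys arr).set q (-(m - s), (q : Int)) ++ [(-(e - m - 1), (arr.length : Int))] :=
        keys_update arr q hq m e he.symm
      rw [hkeq]
      refine (merge_toList _ _).trans ?_
      refine ((merge_toList _ _).append_right _).trans ?_
      refine (((merge_toList l r).append_right _).append_right _).trans ?_
      refine ((hlr.append_right _).append_right _).trans ?_
      refine ((List.perm_append_singleton _ _).append_right _).trans ?_
      exact (set_perm (keys arr) q _ hklen).symm.append_right _

-- enumerate-based output of B equals toRet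
theorem enum_map (arr : List (Int × Int)) (s : Int) :
    (PySem.List.enumerate arr s).map (fun pe => [pe.2.1, pe.2.2, pe.1 + 1]) =
      (List.range arr.length).map
        (fun p => [(arr.getD p (0,0)).1, (arr.getD p (0,0)).2, s + (p : Int) + 1]) := by
  induction arr generalizing s with
  | nil => simp [PySem.List.enumerate]
  | cons a t ih =>
    rw [PySem.List.enumerate_cons]
    simp only [List.map_cons, List.length_cons, List.range_succ_eq_map, List.map_map, ih]
    congr 1
    · simp
    · apply List.map_congr_left
      intro p _
      simp [Function.comp]
      omega

theorem b_out (arr : List (Int × Int)) :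
    (PySem.List.enumerate arr).map (fun pe => [pe.2.1, pe.2.2, pe.1 + 1]) = toRet arr := by
  rw [toRet, enum_map]
  apply List.map_congr_left
  intro p _
  simp

-- the main loop invariant
theorem main_inv (k : Nat) :
    (List.range k).foldl (fun st (j : Nat) => aStep st (1 + (j : Int))) [[0, 359, 1]] =
      toRet ((List.range k).foldl (fun st (j : Nat) => bStep st (1 + (j : Int)))
        ([(0, 359)], SHeap.node (-359) 0 .nil .nil)).1
    ∧ ((List.range k).foldl (fun st (j : Nat) => bStep st (1 + (j : Int)))
        ([(0, 359)], SHeap.node (-359) 0 .nil .nil)).1.length = k + 1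
    ∧ HOrd ((List.range k).foldl (fun st (j : Nat) => bStep st (1 + (j : Int)))
        ([(0, 359)], SHeap.node (-359) 0 .nil .nil)).2
    ∧ ((List.range k).foldl (fun st (j : Nat) => bStep st (1 + (j : Int)))
        ([(0, 359)], SHeap.node (-359) 0 .nil .nil)).2.toList.Perm
        (keys ((List.range k).foldl (fun st (j : Nat) => bStep st (1 + (j : Int)))
          ([(0, 359)], SHeap.node (-359) 0 .nil .nil)).1) := by
  induction k with
  | zero =>
    refine ⟨by decide, by decide, by simp [HOrd, SHeap.toList], by decide⟩
  | succ k ih =>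
    obtain ⟨hret, hlen, hord, hperm⟩ := ih
    set st := (List.range k).foldl (fun st (j : Nat) => bStep st (1 + (j : Int)))
      ([(0, 359)], SHeap.node (-359) 0 .nil .nil) with hst
    have hstep := step_eq st.1 st.2 (1 + (k : Int)) (by omega) (by omega) hord hperm
    simp only [List.range_succ, List.foldl_append, List.foldl_cons, List.foldl_nil]
    rw [hret, ← hst]
    refine ⟨hstep.1, by rw [hstep.2.1, hlen], hstep.2.2.1, hstep.2.2.2⟩

-- ===== VERDICT (by name: the statement is the Claim_ definition above) =====
theorem consistentHashing_spec : Claim_equal_consistentHashing := by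
  intro n _
  unfold Spec_consistentHashing consistentHashing consistentHashing_alt
  by_cases h0 : n = 0
  · simp [h0]
  · simp only [if_neg h0]
    by_cases h1 : n < 1
    · rw [PySem.List.pyRange_one_eq_nil (by omega)]
      decide
    · rw [PySem.List.pyRange_one, List.foldl_map, List.foldl_map]
      rw [b_out]
      exact (main_inv (n - 1).toNat).1
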